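-- pv_equiv track=rewrite | github.com/peterswimm/extending-move | handlers/wavetable_param_editor_handler_class.py | _strip_qualifiers
-- ===== SOURCE A (Python) =====
-- def _strip_qualifiers(name: str) -> str:
--     """Remove common qualifier prefixes from a parameter name."""
--     prefixes = [
--         "Times_",
--         "Values_",
--         "Slopes_",
--         "Time_",
--         "Shape_",
--     ]
--     changed = True
--     while changed:
--         changed = False
--         for p in prefixes:
--             if name.startswith(p):
--                 name = name[len(p) :]
--                 changed = True
--     return name
-- ===== SOURCE B (Python) =====
-- _PREFIXES = ("Times_", "Values_", "Slopes_", "Time_", "Shape_")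
--
-- def _strip_qualifiers(name: str) -> str:
--     """Remove common qualifier prefixes from a parameter name."""
--     i = 0
--     while True:
--         p = next((q for q in _PREFIXES if name.startswith(q, i)), None)
--         if p is None:
--             return name[i:]
--         i += len(p)
-- ===== Notes on version B (the rewrite author's own statement) =====
-- stated objective: alternative
-- what changed: Replaces the changed-flag fixpoint loop that rebuilds the string after every strip with a single forward scan keeping only an index into the original string, slicing once at the end.
import Mathlib
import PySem

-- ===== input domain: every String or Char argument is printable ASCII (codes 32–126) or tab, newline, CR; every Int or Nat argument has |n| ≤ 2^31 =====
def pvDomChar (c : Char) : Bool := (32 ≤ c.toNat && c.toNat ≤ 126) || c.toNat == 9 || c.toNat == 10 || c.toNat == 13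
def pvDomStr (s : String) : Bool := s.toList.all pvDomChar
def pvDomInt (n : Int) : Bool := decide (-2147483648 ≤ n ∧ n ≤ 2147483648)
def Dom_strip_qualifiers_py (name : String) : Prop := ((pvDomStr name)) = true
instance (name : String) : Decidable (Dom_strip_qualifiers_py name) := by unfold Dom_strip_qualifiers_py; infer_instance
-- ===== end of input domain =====

-- B replaces A's changed-flag fixpoint loop (which rebuilds the string after every strip)
-- with a single forward scan keeping an index into the original string (objective: alternative).

-- the concrete prefix list shared by both Pythons
def pvPrefixes : List (List Char) :=
  ["Times_".toList, "Values_".toList, "Slopes_".toList, "Time_".toList, "Shape_".toList]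

-- ===== PORT A =====
-- one iteration of A's inner `for p in prefixes` loop body, state = (name, changed)
def pvAPass (s : List Char × Bool) (p : List Char) : List Char × Bool :=
  if p.isPrefixOf s.1 then (s.1.drop p.length, true) else s
  -- name[len(p):] with 0 ≤ len(p): List.drop is exact here

-- used by the termination proofs of the WF recursions below
theorem pvAPass_fst_le (s : List Char × Bool) (p : List Char) :
    (pvAPass s p).1.length ≤ s.1.length := by
  unfold pvAPass; split <;> simp [List.length_drop]

theorem pvFold_fst_le (ps : List (List Char)) (s : List Char × Bool) :
    (ps.foldl pvAPass s).1.length ≤ s.1.length := by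
  induction ps generalizing s with
  | nil => simp
  | cons p ps ih => exact le_trans (ih (pvAPass s p)) (pvAPass_fst_le s p)

-- if the changed flag came out true starting from false, the string strictly shrank
theorem pvFold_changed_lt (ps : List (List Char)) (hps : ∀ p ∈ ps, p ≠ [])
    (s : List Char) (h : (ps.foldl pvAPass (s, false)).2 = true) :
    (ps.foldl pvAPass (s, false)).1.length < s.length := by
  induction ps generalizing s with
  | nil => simp at h
  | cons p ps ih =>
    simp only [List.foldl_cons]
    by_cases hp : p.isPrefixOf s
    · have hpne : p ≠ [] := hps p (by simp)
      have hple : p.length ≤ s.length := (List.isPrefixOf_iff_prefix.mp hp).length_le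
      have hppos : 0 < p.length := List.length_pos_iff.mpr hpne
      have := pvFold_fst_le ps ((s.drop p.length), true)
      simp only [pvAPass, hp, if_pos] at *
      simp only [List.length_drop] at this
      omega
    · simp only [pvAPass, hp, if_neg, Bool.false_eq_true, ite_false]
      simp only [List.foldl_cons, pvAPass, hp, ite_false] at h
      exact ih (fun q hq => hps q (by simp [hq])) s h

theorem pvPrefixes_ne_nil : ∀ p ∈ pvPrefixes, p ≠ [] := by decide

-- the `while changed:` loop of A
def pvALoop (name : List Char) : List Char :=
  let s := pvPrefixes.foldl pvAPass (name, false)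
  if h : s.2 = true then pvALoop s.1 else s.1
termination_by name.length
decreasing_by exact pvFold_changed_lt pvPrefixes pvPrefixes_ne_nil name h

def strip_qualifiers_py (name : String) : String :=
  String.ofList (pvALoop name.toList)

-- ===== PORT B =====
-- B's `while True:` scan: i is the index into the original string;
-- `next((q for q in PREFIXES if name.startswith(q, i)), None)` ports to List.find?,
-- `name.startswith(q, i)` is q.isPrefixOf (name.drop i); `name[i:]` with 0 ≤ i is List.drop.
def pvBAux (name : List Char) (i : Nat) : List Char :=
  match h : pvPrefixes.find? (fun p => p.isPrefixOf (name.drop i)) with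
  | none => name.drop i
  | some p => pvBAux name (i + p.length)
termination_by name.length - i
decreasing_by
  have hmem : p ∈ pvPrefixes := List.mem_of_find?_eq_some h
  have hpre : p.isPrefixOf (name.drop i) := by
    have := List.find?_some h; simpa using this
  have hpne : p ≠ [] := pvPrefixes_ne_nil p hmem
  have hppos : 0 < p.length := List.length_pos_iff.mpr hpne
  have hple : p.length ≤ (name.drop i).length := (List.isPrefixOf_iff_prefix.mp hpre).length_le
  simp only [List.length_drop] at hple
  omega

def strip_qualifiers_py_alt (name : String) : String :=
  String.ofList (pvBAux name.toList 0)

-- ===== PRECONDITION & SPEC =====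
def Spec_strip_qualifiers_py (name : String) (out : String) : Prop := out = strip_qualifiers_py_alt name
instance (name : String) (out : String) : Decidable (Spec_strip_qualifiers_py name out) := by unfold Spec_strip_qualifiers_py; infer_instance

-- ===== CLAIM (what is proved, stated in full; the proofs are below) =====
def Claim_equal_strip_qualifiers_py : Prop := ∀ (name : String), Dom_strip_qualifiers_py name → Spec_strip_qualifiers_py name (strip_qualifiers_py name)

-- ===== LEMMAS AND PROOFS =====

-- the common normal form: repeatedly strip the first matching prefix
def pvNF (s : List Char) : List Char :=
  match h : pvPrefixes.find? (fun p => p.isPrefixOf s) with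
  | none => s
  | some p => pvNF (s.drop p.length)
termination_by s.length
decreasing_by
  have hmem : p ∈ pvPrefixes := List.mem_of_find?_eq_some h
  have hpre : p.isPrefixOf s := by have := List.find?_some h; simpa using this
  have hppos : 0 < p.length := List.length_pos_iff.mpr (pvPrefixes_ne_nil p hmem)
  have hple := (List.isPrefixOf_iff_prefix.mp hpre).length_le
  simp only [List.length_drop]; omega

-- no two distinct prefixes in pvPrefixes are prefixes of one another
theorem pvPrefixes_indep : ∀ p ∈ pvPrefixes, ∀ q ∈ pvPrefixes,
    p.isPrefixOf q → p = q := by decide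

-- uniqueness: if p ∈ pvPrefixes matches s, find? returns exactly p
theorem pvFind_unique (p : List Char) (hp : p ∈ pvPrefixes)
    (s : List Char) (h : p.isPrefixOf s) :
    pvPrefixes.find? (fun q => q.isPrefixOf s) = some p := by
  have hgen : ∀ (ps : List (List Char)), (∀ q ∈ ps, q ∈ pvPrefixes) → p ∈ ps →
      ps.find? (fun q => q.isPrefixOf s) = some p := by
    intro ps
    induction ps with
    | nil => intro _ hmem; simp at hmem
    | cons q ps ih =>
      intro hsub hmem
      by_cases hq : q.isPrefixOf s
      · have hqp : q = p := by
          have hq' : q <+: s := List.isPrefixOf_iff_prefix.mp hq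
          have hp' : p <+: s := List.isPrefixOf_iff_prefix.mp h
          rcases List.prefix_or_prefix_of_prefix hq' hp' with hqp | hpq
          · exact pvPrefixes_indep q (hsub q (by simp)) p hp
              (List.isPrefixOf_iff_prefix.mpr hqp)
          · exact (pvPrefixes_indep p hp q (hsub q (by simp))
              (List.isPrefixOf_iff_prefix.mpr hpq)).symm
        subst hqp
        simp [List.find?_cons, h]
      · have hmem' : p ∈ ps := by
          rcases List.mem_cons.mp hmem with rfl | h'
          · exact absurd h hq
          · exact h'
        simp only [List.find?_cons, hq]
        exact ih (fun r hr => hsub r (by simp [hr])) hmem'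
  exact hgen pvPrefixes (fun q hq => hq) hp

-- stripping a matching prefix does not change the normal form
theorem pvNF_step (p : List Char) (hp : p ∈ pvPrefixes) (s : List Char)
    (h : p.isPrefixOf s) : pvNF s = pvNF (s.drop p.length) := by
  rw [pvNF]
  split
  · rename_i hn
    rw [pvFind_unique p hp s h] at hn; cases hn
  · rename_i q hq
    rw [pvFind_unique p hp s h] at hq
    injection hq with hq
    subst hq; rfl

-- one pass of A's inner for-loop preserves the normal form
theorem pvFold_nf (ps : List (List Char)) (hps : ∀ q ∈ ps, q ∈ pvPrefixes)
    (s : List Char × Bool) : pvNF (ps.foldl pvAPass s).1 = pvNF s.1 := by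
  induction ps generalizing s with
  | nil => simp
  | cons p ps ih =>
    simp only [List.foldl_cons]
    rw [ih (fun q hq => hps q (by simp [hq]))]
    unfold pvAPass
    split
    · rename_i hpre
      exact (pvNF_step p (hps p (by simp)) s.1 hpre).symm
    · rfl

-- if the changed flag stays false, nothing was stripped and no prefix matches
theorem pvFold_unchanged (ps : List (List Char)) (s : List Char)
    (h : (ps.foldl pvAPass (s, false)).2 = false) :
    (ps.foldl pvAPass (s, false)).1 = s ∧ ∀ p ∈ ps, ¬ p.isPrefixOf s := by
  induction ps generalizing s with
  | nil => simp
  | cons p ps ih =>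
    have hsnd : ∀ (ps' : List (List Char)) (t : List Char),
        (ps'.foldl pvAPass (t, true)).2 = true := by
      intro ps'
      induction ps' with
      | nil => intro t; rfl
      | cons q ps' ih' =>
        intro t
        simp only [List.foldl_cons, pvAPass]
        split <;> exact ih' _
    by_cases hp : p.isPrefixOf s
    · exfalso
      simp only [List.foldl_cons, pvAPass, hp, if_pos] at h
      rw [hsnd ps (s.drop p.length)] at h
      simp at h
    · simp only [List.foldl_cons, pvAPass, hp, ite_false] at h ⊢
      obtain ⟨h1, h2⟩ := ih s h
      refine ⟨h1, ?_⟩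
      intro q hq
      rcases List.mem_cons.mp hq with rfl | hq'
      · exact hp
      · exact h2 q hq'

theorem pvALoop_eq_nf (s : List Char) : pvALoop s = pvNF s := by
  by_cases h : (pvPrefixes.foldl pvAPass (s, false)).2 = true
  · have hlt := pvFold_changed_lt pvPrefixes pvPrefixes_ne_nil s h
    rw [pvALoop]
    simp only [dif_pos h]
    rw [pvALoop_eq_nf (pvPrefixes.foldl pvAPass (s, false)).1]
    exact pvFold_nf pvPrefixes (fun q hq => hq) (s, false)
  · have h' : (pvPrefixes.foldl pvAPass (s, false)).2 = false := by
      simpa using h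
    obtain ⟨h1, h2⟩ := pvFold_unchanged pvPrefixes s h'
    have hfind : pvPrefixes.find? (fun p => p.isPrefixOf s) = none := by
      apply List.find?_eq_none.mpr
      intro p hp
      simpa using h2 p hp
    rw [pvALoop]
    simp only [dif_neg h]
    rw [h1, pvNF]
    split
    · rfl
    · rename_i q hq
      rw [hfind] at hq; cases hq
termination_by s.length
decreasing_by exact pvFold_changed_lt pvPrefixes pvPrefixes_ne_nil s h

theorem pvBAux_eq_nf (name : List Char) (i : Nat) :
    pvBAux name i = pvNF (name.drop i) := by
  rw [pvBAux, pvNF]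
  split
  · rfl
  · rename_i p h
    have hmem : p ∈ pvPrefixes := List.mem_of_find?_eq_some h
    have hpre : p.isPrefixOf (name.drop i) := by
      have := List.find?_some h; simpa using this
    have hppos : 0 < p.length := List.length_pos_iff.mpr (pvPrefixes_ne_nil p hmem)
    have hple : p.length ≤ (name.drop i).length := (List.isPrefixOf_iff_prefix.mp hpre).length_le
    rw [pvBAux_eq_nf name (i + p.length)]
    congr 1
    rw [List.drop_drop]
termination_by name.length - i
decreasing_by
  simp only [List.length_drop] at hple
  omega

-- ===== VERDICT (by name: the statement is the Claim_ definition above) =====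
theorem strip_qualifiers_py_spec : Claim_equal_strip_qualifiers_py := by
  intro name _
  unfold Spec_strip_qualifiers_py strip_qualifiers_py strip_qualifiers_py_alt
  rw [pvALoop_eq_nf, pvBAux_eq_nf, List.drop_zero]
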